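-- pv_equiv track=rewrite | github.com/caiocrocha/NLPPlayground | src/CustomPortugueseLemmatizer.py | is_canonical
-- ===== SOURCE A (Python) =====
-- def is_canonical(word):
--     canonical = True
--     seq = iter(word)
--
--     for c in seq:
--         if c not in 'bcdfghjklmnpqrstvwxyzç':
--             canonical = False
--             break
--         else:
--             try:
--                 n = next(seq)
--             except StopIteration as e:
--                 canonical = False
--                 break
--             if n not in 'aeiouáàãâéêíóõôúü':
--                 canonical = False
--                 break
--     return canonical
-- ===== SOURCE B (Python) =====
-- def is_canonical(word):
--     if len(word) % 2 != 0:
--         return False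
--     return all(
--         c in ('bcdfghjklmnpqrstvwxyzç' if i % 2 == 0 else 'aeiouáàãâéêíóõôúü')
--         for i, c in enumerate(word))
-- ===== Notes on version B (the rewrite author's own statement) =====
-- stated objective: simpler
-- what changed: Replaced A's pair-consuming iterator loop with manual next()/StopIteration handling by a length-parity guard plus a single all() scan of enumerate(word) classifying each position by index parity.
import Mathlib
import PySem

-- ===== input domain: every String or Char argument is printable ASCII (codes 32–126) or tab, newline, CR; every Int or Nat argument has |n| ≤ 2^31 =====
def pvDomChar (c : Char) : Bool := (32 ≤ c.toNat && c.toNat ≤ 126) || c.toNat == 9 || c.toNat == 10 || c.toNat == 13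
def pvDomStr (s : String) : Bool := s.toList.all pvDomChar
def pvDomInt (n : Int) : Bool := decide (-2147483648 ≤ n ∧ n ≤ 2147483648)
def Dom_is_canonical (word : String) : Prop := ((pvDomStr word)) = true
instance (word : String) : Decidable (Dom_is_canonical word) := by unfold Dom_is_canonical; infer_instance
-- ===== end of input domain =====

-- B replaces A's pair-consuming iterator loop (manual next()) by a length-parity guard
-- plus one all() scan over enumerate(word) classifying positions by index parity (simpler).


-- ===== PORT A =====
def pvConsonants : List Char := "bcdfghjklmnpqrstvwxyzç".toList
def pvVowels : List Char := "aeiouáàãâéêíóõôúü".toList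

-- A's for-loop over iter(word): consumes two characters per iteration via next();
-- a lone leftover character is the StopIteration branch (canonical = False).
def pvCanonLoop : List Char → Bool
  | [] => true
  | [c] => if !(pvConsonants.contains c) then false else false  -- next() raises StopIteration
  | c :: n :: rest =>
    if !(pvConsonants.contains c) then false
    else if !(pvVowels.contains n) then false
    else pvCanonLoop rest

def is_canonical (word : String) : Bool := pvCanonLoop word.toList

-- ===== PORT B =====
def is_canonical_alt (word : String) : Bool :=
  if PySem.Int.mod (PySem.Str.len word) 2 != 0 then false
  else
    (PySem.List.enumerate word.toList 0).all fun p =>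
      if PySem.Int.mod p.1 2 == 0 then pvConsonants.contains p.2
      else pvVowels.contains p.2

-- ===== PRECONDITION & SPEC =====
def Spec_is_canonical (word : String) (out : Bool) : Prop := out = is_canonical_alt word
instance (word : String) (out : Bool) : Decidable (Spec_is_canonical word out) := by unfold Spec_is_canonical; infer_instance

-- ===== CLAIM (what is proved, stated in full; the proofs are below) =====
def Claim_equal_is_canonical : Prop := ∀ (word : String), Dom_is_canonical word → Spec_is_canonical word (is_canonical word)

-- ===== LEMMAS AND PROOFS =====

theorem pv_mod_two (s : Int) : PySem.Int.mod s 2 = s % 2 := by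
  simp [PySem.Int.mod, Int.fmod_eq_emod]

theorem pv_main (cs : List Char) (s : Int) (hs : s % 2 = 0) :
    pvCanonLoop cs =
      (decide ((cs.length : Int) % 2 = 0) &&
        (PySem.List.enumerate cs s).all fun p =>
          if PySem.Int.mod p.1 2 == 0 then pvConsonants.contains p.2
          else pvVowels.contains p.2) := by
  match cs with
  | [] => simp [pvCanonLoop, PySem.List.enumerate_nil]
  | [c] =>
    simp only [pvCanonLoop, PySem.List.enumerate_cons, PySem.List.enumerate_nil,
      List.all_cons, List.all_nil, List.length_cons, List.length_nil]
    norm_num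
  | c :: n :: rest =>
    have ih := pv_main rest (s + 1 + 1) (by omega)
    have h1 : (s + 1) % 2 = 1 := by omega
    have hlen : ((rest.length + 1 + 1 : Nat) : Int) % 2 = (rest.length : Int) % 2 := by
      push_cast; omega
    simp only [pvCanonLoop, PySem.List.enumerate_cons, List.all_cons, List.length_cons,
      pv_mod_two, hs, h1, ih, hlen]
    by_cases hc : pvConsonants.contains c <;> by_cases hv : pvVowels.contains n <;>
      simp [hc, hv, Bool.and_left_comm]
termination_by cs.length

theorem is_canonical_spec_impl (word : String) :
    is_canonical word = is_canonical_alt word := by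
  unfold is_canonical is_canonical_alt
  rw [pv_main word.toList 0 (by decide)]
  simp [PySem.Str.len_eq]
  have hd : ∀ n : Int, decide (2 ∣ n) = !decide (n % 2 = 1) := fun n => by
    rcases Int.emod_two_eq n with h | h <;> simp [Int.dvd_iff_emod_eq_zero, h]
  rw [hd]

-- ===== VERDICT (by name: the statement is the Claim_ definition above) =====
theorem is_canonical_spec : Claim_equal_is_canonical := by
  intro word _
  exact is_canonical_spec_impl word
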